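-- pv_equiv track=rewrite | github.com/choijaehoon1/programmers_level | src/test80.py | solution
-- ===== SOURCE A (Python) =====
-- from collections import deque
--
-- dx = [-1,1,0,0]
--
-- dy = [0,0,-1,1]
--
-- def find(i,board):
--     for x in range(4):
--         for y in range(3):
--             if board[x][y] == i:
--                 return x,y
--
-- def bfs(x,y,c_x,c_y):
--     dist = [[-1]*3 for _ in range(4)]
--     dist[x][y] = 0
--     q = deque()
--     q.append([x,y])
--
--     while q:
--         x,y = q.popleft()
--         for k in range(4):
--             nx = x + dx[k]
--             ny = y + dy[k]
--             if 0<=nx<4 and 0<=ny<3: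
--                 if dist[nx][ny] == -1:
--                     dist[nx][ny] = dist[x][y] + 1
--                     q.append([nx,ny])
--     return dist[c_x][c_y]
--
-- def solution(numbers, hand):
--     answer = ''
--     board = [
--         [1,2,3],
--         [4,5,6],
--         [7,8,9],
--         ['*',0,'#']
--     ]
--
--     l_x,l_y = 3,0
--     r_x,r_y = 3,2
--
--     for i in numbers:
--         if i in [1,4,7]:
--             if i == 1:
--                 l_x,l_y = 0,0
--             elif i == 4:
--                 l_x,l_y = 1,0
--             elif i == 7:
--                 l_x,l_y = 2,0
--             answer += 'L'
--         elif i in [3,6,9]: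
--             if i == 3:
--                 r_x,r_y = 0,2
--             elif i == 6:
--                 r_x,r_y = 1,2
--             elif i == 9:
--                 r_x,r_y = 2,2
--             answer += 'R'
--         else:
--             c_x,c_y = find(i,board)
--             l_num = bfs(l_x,l_y,c_x,c_y)
--             r_num = bfs(r_x,r_y,c_x,c_y)
--             if l_num == r_num:
--                 if hand == 'right':
--                     answer += 'R'
--                     r_x,r_y = c_x,c_y
--                 else:
--                     answer += 'L'
--                     l_x,l_y = c_x,c_y
--             elif l_num < r_num:
--                 answer += 'L'
--                 l_x,l_y = c_x,c_y
--             elif l_num > r_num: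
--                 answer += 'R'
--                 r_x,r_y = c_x,c_y
--
--     return answer
-- ===== SOURCE B (Python) =====
-- def solution(numbers, hand):
--     def pos(d):
--         return (3, 1) if d == 0 else ((d - 1) // 3, (d - 1) % 3)
--     lp, rp = (3, 0), (3, 2)
--     out = []
--     for d in numbers:
--         p = pos(d)
--         if p[1] == 0:
--             out.append('L')
--             lp = p
--         elif p[1] == 2:
--             out.append('R')
--             rp = p
--         else:
--             dl = abs(lp[0] - p[0]) + abs(lp[1] - p[1])
--             dr = abs(rp[0] - p[0]) + abs(rp[1] - p[1])
--             if dl < dr or (dl == dr and hand != 'right'):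
--                 out.append('L')
--                 lp = p
--             else:
--                 out.append('R')
--                 rp = p
--     return ''.join(out)
-- ===== Notes on version B (the rewrite author's own statement) =====
-- stated objective: simpler
-- what changed: Replaces the grid-scan find and per-step BFS with a closed-form digit-to-coordinate formula and Manhattan distance (which equals BFS distance on the obstacle-free keypad), keeping one plain loop.
import Mathlib
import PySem

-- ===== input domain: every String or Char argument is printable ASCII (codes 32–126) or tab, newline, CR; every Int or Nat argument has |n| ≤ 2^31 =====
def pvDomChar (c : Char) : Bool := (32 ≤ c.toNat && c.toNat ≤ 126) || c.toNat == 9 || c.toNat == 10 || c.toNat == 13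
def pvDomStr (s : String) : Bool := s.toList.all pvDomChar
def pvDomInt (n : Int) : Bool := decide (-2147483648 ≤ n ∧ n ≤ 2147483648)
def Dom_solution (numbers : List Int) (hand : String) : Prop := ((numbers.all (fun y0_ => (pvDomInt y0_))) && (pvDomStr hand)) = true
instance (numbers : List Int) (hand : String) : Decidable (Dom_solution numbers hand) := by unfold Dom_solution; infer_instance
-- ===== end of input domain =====

-- B replaces A's grid-scan `find` and per-digit BFS by a closed-form digit→coordinate
-- formula and Manhattan distance (equal to BFS distance on the obstacle-free keypad).

-- ===== PORT A =====
-- the keypad board holds ints plus the '*' and '#' characters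
inductive Cell
  | num : Int → Cell
  | star
  | hash
deriving DecidableEq

def boardA : List (List Cell) :=
  [[.num 1, .num 2, .num 3], [.num 4, .num 5, .num 6],
   [.num 7, .num 8, .num 9], [.star, .num 0, .hash]]

def dxA : List Int := [-1, 1, 0, 0]
def dyA : List Int := [0, 0, -1, 1]

-- board[x][y]; indices produced by range()/the bounds check, always in range here
def get2c (b : List (List Cell)) (x y : Int) : Cell :=
  (PySem.List.pyGet? ((PySem.List.pyGet? b x).getD []) y).getD Cell.star

-- inner `for y in range(3)` of find
def findInner (i : Int) (b : List (List Cell)) (x : Int) : List Int → Option Int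
  | [] => none
  | y :: ys => if get2c b x y = Cell.num i then some y else findInner i b x ys

-- outer `for x in range(4)` of find; falls off the end → Python's implicit None
def findOuter (i : Int) (b : List (List Cell)) : List Int → Option (Int × Int)
  | [] => none
  | x :: xs =>
    match findInner i b x (PySem.List.pyRange 0 3 1) with
    | some y => some (x, y)
    | none => findOuter i b xs

def findA (i : Int) (b : List (List Cell)) : Option (Int × Int) :=
  findOuter i b (PySem.List.pyRange 0 4 1)

def get2 (d : List (List Int)) (x y : Int) : Int :=
  (PySem.List.pyGet? ((PySem.List.pyGet? d x).getD []) y).getD (-2)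

-- dist[x][y] = v; bfs only writes at indices already checked 0≤nx<4, 0≤ny<3, so toNat is exact
def set2 (d : List (List Int)) (x y v : Int) : List (List Int) :=
  d.set x.toNat (((PySem.List.pyGet? d x).getD []).set y.toNat v)

-- the `for k in range(4)` body of the BFS while-loop: state (queue, dist)
def bfsScan (x y : Int) : List Int → List (Int × Int) → List (List Int) → List (Int × Int) × List (List Int)
  | [], q, dist => (q, dist)
  | k :: ks, q, dist =>
    let nx := x + (PySem.List.pyGet? dxA k).getD 0
    let ny := y + (PySem.List.pyGet? dyA k).getD 0
    if 0 ≤ nx ∧ nx < 4 ∧ 0 ≤ ny ∧ ny < 3 then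
      if get2 dist nx ny = -1 then
        bfsScan x y ks (q ++ [(nx, ny)]) (set2 dist nx ny (get2 dist x y + 1))
      else bfsScan x y ks q dist
    else bfsScan x y ks q dist

-- `while q:` — each iteration pops once; on the 12-cell grid at most 13 iterations
-- ever happen, so fuel 24 is never exhausted (fuel only makes the loop total)
def bfsLoop : Nat → List (Int × Int) → List (List Int) → List (List Int)
  | 0, _, dist => dist
  | _ + 1, [], dist => dist
  | fuel + 1, (x, y) :: rest, dist =>
    let s := bfsScan x y (PySem.List.pyRange 0 4 1) rest dist
    bfsLoop fuel s.1 s.2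

def bfsA (x y cx cy : Int) : Int :=
  let dist0 := set2 [[-1,-1,-1],[-1,-1,-1],[-1,-1,-1],[-1,-1,-1]] x y 0
  get2 (bfsLoop 24 [(x, y)] dist0) cx cy

-- loop body of A's solution; state (answer, l_x, l_y, r_x, r_y)
def stepA (hand : String) (st : String × Int × Int × Int × Int) (i : Int) : String × Int × Int × Int × Int :=
  let (answer, lx, ly, rx, ry) := st
  if i = 1 ∨ i = 4 ∨ i = 7 then
    let p : Int × Int :=
      if i = 1 then (0, 0) else if i = 4 then (1, 0) else if i = 7 then (2, 0) else (lx, ly)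
    (answer ++ "L", p.1, p.2, rx, ry)
  else if i = 3 ∨ i = 6 ∨ i = 9 then
    let p : Int × Int :=
      if i = 3 then (0, 2) else if i = 6 then (1, 2) else if i = 9 then (2, 2) else (rx, ry)
    (answer ++ "R", lx, ly, p.1, p.2)
  else
    match findA i boardA with
    | none => (answer, lx, ly, rx, ry)   -- Python raises TypeError here (outside Pre_solution)
    | some (cx, cy) =>
      let lnum := bfsA lx ly cx cy
      let rnum := bfsA rx ry cx cy
      if lnum = rnum then
        if hand = "right" then (answer ++ "R", lx, ly, cx, cy)
        else (answer ++ "L", cx, cy, rx, ry)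
      else if lnum < rnum then (answer ++ "L", cx, cy, rx, ry)
      else if rnum < lnum then (answer ++ "R", lx, ly, cx, cy)
      else (answer, lx, ly, rx, ry)      -- unreachable final elif fall-through

def solution (numbers : List Int) (hand : String) : String :=
  (numbers.foldl (stepA hand) ("", 3, 0, 3, 2)).1

-- ===== PORT B =====
def posB (d : Int) : Int × Int :=
  if d = 0 then (3, 1) else (PySem.Int.floordiv (d - 1) 3, PySem.Int.mod (d - 1) 3)

def goB (hand : String) : List Int → Int × Int → Int × Int → List Char
  | [], _, _ => []
  | d :: rest, lp, rp =>
    let p := posB d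
    if p.2 = 0 then 'L' :: goB hand rest p rp
    else if p.2 = 2 then 'R' :: goB hand rest lp p
    else
      let dl := |lp.1 - p.1| + |lp.2 - p.2|
      let dr := |rp.1 - p.1| + |rp.2 - p.2|
      if dl < dr ∨ (dl = dr ∧ hand ≠ "right") then 'L' :: goB hand rest p rp
      else 'R' :: goB hand rest lp p

def solution_alt (numbers : List Int) (hand : String) : String :=
  String.ofList (goB hand numbers (3, 0) (3, 2))

-- ===== PRECONDITION & SPEC =====
-- Pre_ excludes exactly the inputs where A raises: any number outside 0..9 makes
-- `find` return None and the unpacking `c_x,c_y = find(...)` raise TypeError.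
def Pre_solution (numbers : List Int) (hand : String) : Prop :=
  ∀ i ∈ numbers, 0 ≤ i ∧ i ≤ 9
instance (numbers : List Int) (hand : String) : Decidable (Pre_solution numbers hand) := by
  unfold Pre_solution; infer_instance
def pvWitness_solution : List Int × String := ([1, 0, 5, 8, 3], "right")

def Spec_solution (numbers : List Int) (hand : String) (out : String) : Prop := out = solution_alt numbers hand
instance (numbers : List Int) (hand : String) (out : String) : Decidable (Spec_solution numbers hand out) := by unfold Spec_solution; infer_instance

-- ===== CLAIM (what is proved, stated in full; the proofs are below) =====
def Claim_equal_solution : Prop := ∀ (numbers : List Int) (hand : String), Dom_solution numbers hand → Pre_solution numbers hand → Spec_solution numbers hand (solution numbers hand)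

-- ===== LEMMAS AND PROOFS =====

-- BFS distance on the obstacle-free 4×3 grid is Manhattan distance
lemma bfs_eq_manh (x y cx cy : Int)
    (hx0 : 0 ≤ x) (hx1 : x < 4) (hy0 : 0 ≤ y) (hy1 : y < 3)
    (hc0 : 0 ≤ cx) (hc1 : cx < 4) (hd0 : 0 ≤ cy) (hd1 : cy < 3) :
    bfsA x y cx cy = |x - cx| + |y - cy| := by
  interval_cases x <;> interval_cases y <;> interval_cases cx <;> interval_cases cy <;> decide

lemma str_snoc (s : String) (c : Char) (l : List Char) :
    s ++ String.ofList (c :: l) = (s ++ String.ofList [c]) ++ String.ofList l := by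
  rw [show (c :: l) = [c] ++ l from rfl, String.ofList_append, String.append_assoc]

-- A's tie/compare chain, as one if on B's condition
lemma step_middle (hand ans : String) (lx ly rx ry d cx cy : Int)
    (h1 : ¬(d = 1 ∨ d = 4 ∨ d = 7)) (h2 : ¬(d = 3 ∨ d = 6 ∨ d = 9))
    (hf : findA d boardA = some (cx, cy))
    (hlx0 : 0 ≤ lx) (hlx1 : lx < 4) (hly0 : 0 ≤ ly) (hly1 : ly < 3)
    (hrx0 : 0 ≤ rx) (hrx1 : rx < 4) (hry0 : 0 ≤ ry) (hry1 : ry < 3)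
    (hc0 : 0 ≤ cx) (hc1 : cx < 4) (hd0 : 0 ≤ cy) (hd1 : cy < 3) :
    stepA hand (ans, lx, ly, rx, ry) d =
      (if |lx - cx| + |ly - cy| < |rx - cx| + |ry - cy| ∨
          (|lx - cx| + |ly - cy| = |rx - cx| + |ry - cy| ∧ hand ≠ "right")
       then (ans ++ "L", cx, cy, rx, ry) else (ans ++ "R", lx, ly, cx, cy)) := by
  simp only [stepA, h1, h2, if_false, hf]
  rw [bfs_eq_manh lx ly cx cy hlx0 hlx1 hly0 hly1 hc0 hc1 hd0 hd1,
      bfs_eq_manh rx ry cx cy hrx0 hrx1 hry0 hry1 hc0 hc1 hd0 hd1]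
  generalize |lx - cx| + |ly - cy| = a
  generalize |rx - cx| + |ry - cy| = b
  by_cases hh : hand = "right" <;>
    simp only [hh, ne_eq, not_true_eq_false, and_false, or_false, not_false_eq_true,
      and_true, if_true, if_false] <;>
    split_ifs <;> first | rfl | (exfalso; omega)

lemma go_middle (hand : String) (rest : List Int) (lp rp : Int × Int) (d cx cy : Int)
    (hp : posB d = (cx, cy)) (hcy0 : cy ≠ 0) (hcy2 : cy ≠ 2) :
    goB hand (d :: rest) lp rp =
      (if |lp.1 - cx| + |lp.2 - cy| < |rp.1 - cx| + |rp.2 - cy| ∨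
          (|lp.1 - cx| + |lp.2 - cy| = |rp.1 - cx| + |rp.2 - cy| ∧ hand ≠ "right")
       then 'L' :: goB hand rest (cx, cy) rp else 'R' :: goB hand rest lp (cx, cy)) := by
  simp only [goB, hp, hcy0, hcy2, if_false]

lemma main_lemma (numbers : List Int) (hand : String) :
    ∀ (ans : String) (lx ly rx ry : Int),
    (∀ i ∈ numbers, 0 ≤ i ∧ i ≤ 9) →
    0 ≤ lx → lx < 4 → 0 ≤ ly → ly < 3 → 0 ≤ rx → rx < 4 → 0 ≤ ry → ry < 3 →
    (numbers.foldl (stepA hand) (ans, lx, ly, rx, ry)).1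
      = ans ++ String.ofList (goB hand numbers (lx, ly) (rx, ry)) := by
  induction numbers with
  | nil =>
    intro ans lx ly rx ry _ _ _ _ _ _ _ _ _
    simp [goB]
  | cons d rest ih =>
    intro ans lx ly rx ry h hlx0 hlx1 hly0 hly1 hrx0 hrx1 hry0 hry1
    have hrest : ∀ i ∈ rest, 0 ≤ i ∧ i ≤ 9 := fun i hi => h i (List.mem_cons_of_mem _ hi)
    obtain ⟨hd0, hd9⟩ := h d List.mem_cons_self
    rw [List.foldl_cons]
    interval_cases d
    case «0» =>
      rw [step_middle hand ans lx ly rx ry 0 3 1 (by norm_num) (by norm_num) (by decide)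
            hlx0 hlx1 hly0 hly1 hrx0 hrx1 hry0 hry1 (by norm_num) (by norm_num) (by norm_num) (by norm_num),
          go_middle hand rest (lx, ly) (rx, ry) 0 3 1 (by decide) (by norm_num) (by norm_num),
          apply_ite (fun st => (rest.foldl (stepA hand) st).1),
          apply_ite (fun l => ans ++ String.ofList l)]
      split_ifs with hc <;>
        (rw [ih _ _ _ _ _ hrest (by omega) (by omega) (by omega) (by omega) (by omega) (by omega)
              (by omega) (by omega)]
         try conv_rhs => rw [str_snoc]
         try rfl)
    case «1» =>
      have hA : stepA hand (ans, lx, ly, rx, ry) 1 = (ans ++ "L", 0, 0, rx, ry) := by simp [stepA]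
      have hB : goB hand (1 :: rest) (lx, ly) (rx, ry) = 'L' :: goB hand rest (0, 0) (rx, ry) := by
        simp [goB, show posB (1 : Int) = (0, 0) from by decide]
      rw [hA, ih _ _ _ _ _ hrest (by omega) (by omega) (by omega) (by omega) (by omega)
            (by omega) (by omega) (by omega)]
      try conv_rhs => rw [hB, str_snoc]
      try rfl
    case «2» =>
      rw [step_middle hand ans lx ly rx ry 2 0 1 (by norm_num) (by norm_num) (by decide)
            hlx0 hlx1 hly0 hly1 hrx0 hrx1 hry0 hry1 (by norm_num) (by norm_num) (by norm_num) (by norm_num),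
          go_middle hand rest (lx, ly) (rx, ry) 2 0 1 (by decide) (by norm_num) (by norm_num),
          apply_ite (fun st => (rest.foldl (stepA hand) st).1),
          apply_ite (fun l => ans ++ String.ofList l)]
      split_ifs with hc <;>
        (rw [ih _ _ _ _ _ hrest (by omega) (by omega) (by omega) (by omega) (by omega) (by omega)
              (by omega) (by omega)]
         try conv_rhs => rw [str_snoc]
         try rfl)
    case «3» =>
      have hA : stepA hand (ans, lx, ly, rx, ry) 3 = (ans ++ "R", lx, ly, 0, 2) := by simp [stepA]
      have hB : goB hand (3 :: rest) (lx, ly) (rx, ry) = 'R' :: goB hand rest (lx, ly) (0, 2) := by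
        simp [goB, show posB (3 : Int) = (0, 2) from by decide]
      rw [hA, ih _ _ _ _ _ hrest (by omega) (by omega) (by omega) (by omega) (by omega)
            (by omega) (by omega) (by omega)]
      try conv_rhs => rw [hB, str_snoc]
      try rfl
    case «4» =>
      have hA : stepA hand (ans, lx, ly, rx, ry) 4 = (ans ++ "L", 1, 0, rx, ry) := by simp [stepA]
      have hB : goB hand (4 :: rest) (lx, ly) (rx, ry) = 'L' :: goB hand rest (1, 0) (rx, ry) := by
        simp [goB, show posB (4 : Int) = (1, 0) from by decide]
      rw [hA, ih _ _ _ _ _ hrest (by omega) (by omega) (by omega) (by omega) (by omega)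
            (by omega) (by omega) (by omega)]
      try conv_rhs => rw [hB, str_snoc]
      try rfl
    case «5» =>
      rw [step_middle hand ans lx ly rx ry 5 1 1 (by norm_num) (by norm_num) (by decide)
            hlx0 hlx1 hly0 hly1 hrx0 hrx1 hry0 hry1 (by norm_num) (by norm_num) (by norm_num) (by norm_num),
          go_middle hand rest (lx, ly) (rx, ry) 5 1 1 (by decide) (by norm_num) (by norm_num),
          apply_ite (fun st => (rest.foldl (stepA hand) st).1),
          apply_ite (fun l => ans ++ String.ofList l)]
      split_ifs with hc <;>
        (rw [ih _ _ _ _ _ hrest (by omega) (by omega) (by omega) (by omega) (by omega) (by omega)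
              (by omega) (by omega)]
         try conv_rhs => rw [str_snoc]
         try rfl)
    case «6» =>
      have hA : stepA hand (ans, lx, ly, rx, ry) 6 = (ans ++ "R", lx, ly, 1, 2) := by simp [stepA]
      have hB : goB hand (6 :: rest) (lx, ly) (rx, ry) = 'R' :: goB hand rest (lx, ly) (1, 2) := by
        simp [goB, show posB (6 : Int) = (1, 2) from by decide]
      rw [hA, ih _ _ _ _ _ hrest (by omega) (by omega) (by omega) (by omega) (by omega)
            (by omega) (by omega) (by omega)]
      try conv_rhs => rw [hB, str_snoc]
      try rfl
    case «7» =>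
      have hA : stepA hand (ans, lx, ly, rx, ry) 7 = (ans ++ "L", 2, 0, rx, ry) := by simp [stepA]
      have hB : goB hand (7 :: rest) (lx, ly) (rx, ry) = 'L' :: goB hand rest (2, 0) (rx, ry) := by
        simp [goB, show posB (7 : Int) = (2, 0) from by decide]
      rw [hA, ih _ _ _ _ _ hrest (by omega) (by omega) (by omega) (by omega) (by omega)
            (by omega) (by omega) (by omega)]
      try conv_rhs => rw [hB, str_snoc]
      try rfl
    case «8» =>
      rw [step_middle hand ans lx ly rx ry 8 2 1 (by norm_num) (by norm_num) (by decide)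
            hlx0 hlx1 hly0 hly1 hrx0 hrx1 hry0 hry1 (by norm_num) (by norm_num) (by norm_num) (by norm_num),
          go_middle hand rest (lx, ly) (rx, ry) 8 2 1 (by decide) (by norm_num) (by norm_num),
          apply_ite (fun st => (rest.foldl (stepA hand) st).1),
          apply_ite (fun l => ans ++ String.ofList l)]
      split_ifs with hc <;>
        (rw [ih _ _ _ _ _ hrest (by omega) (by omega) (by omega) (by omega) (by omega) (by omega)
              (by omega) (by omega)]
         try conv_rhs => rw [str_snoc]
         try rfl)
    case «9» =>
      have hA : stepA hand (ans, lx, ly, rx, ry) 9 = (ans ++ "R", lx, ly, 2, 2) := by simp [stepA]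
      have hB : goB hand (9 :: rest) (lx, ly) (rx, ry) = 'R' :: goB hand rest (lx, ly) (2, 2) := by
        simp [goB, show posB (9 : Int) = (2, 2) from by decide]
      rw [hA, ih _ _ _ _ _ hrest (by omega) (by omega) (by omega) (by omega) (by omega)
            (by omega) (by omega) (by omega)]
      try conv_rhs => rw [hB, str_snoc]
      try rfl

-- ===== VERDICT (by name: the statement is the Claim_ definition above) =====
theorem solution_spec : Claim_equal_solution := by
  intro numbers hand _ hpre
  unfold Spec_solution solution solution_alt
  have := main_lemma numbers hand "" 3 0 3 2 hpre (by norm_num) (by norm_num) (by norm_num)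
    (by norm_num) (by norm_num) (by norm_num) (by norm_num) (by norm_num)
  simpa using this
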